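-- pv_equiv track=rewrite | github.com/mortyc126-debug/SHA | p27c_2d_birthday.py | compute_f17_f18
-- ===== SOURCE A (Python) =====
-- MASK = 0xFFFFFFFF
--
-- def rotr(x, n): return ((x >> n) | (x << (32-n))) & MASK
--
-- def sig0(x):  return rotr(x,7)  ^ rotr(x,18) ^ (x>>3)
--
-- def sig1(x):  return rotr(x,17) ^ rotr(x,19) ^ (x>>10)
--
-- def Sig0(x):  return rotr(x,2)  ^ rotr(x,13) ^ rotr(x,22)
--
-- def Sig1(x):  return rotr(x,6)  ^ rotr(x,11) ^ rotr(x,25)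
--
-- def Ch(e,f,g): return ((e&f) ^ (~e&g)) & MASK
--
-- def Maj(a,b,c): return (a&b) ^ (a&c) ^ (b&c)
--
-- K = [0x428a2f98,0x71374491,0xb5c0fbcf,0xe9b5dba5,0x3956c25b,0x59f111f1,0x923f82a4,0xab1c5ed5,
--      0xd807aa98,0x12835b01,0x243185be,0x550c7dc3,0x72be5d74,0x80deb1fe,0x9bdc06a7,0xc19bf174,
--      0xe49b69c1,0xefbe4786,0x0fc19dc6,0x240ca1cc,0x2de92c6f,0x4a7484aa,0x5cb0a9dc,0x76f988da,
--      0x983e5152,0xa831c66d,0xb00327c8,0xbf597fc7,0xc6e00bf3,0xd5a79147,0x06ca6351,0x14292967,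
--      0x27b70a85,0x2e1b2138,0x4d2c6dfc,0x53380d13,0x650a7354,0x766a0abb,0x81c2c92e,0x92722c85,
--      0xa2bfe8a1,0xa81a664b,0xc24b8b70,0xc76c51a3,0xd192e819,0xd6990624,0xf40e3585,0x106aa070,
--      0x19a4c116,0x1e376c08,0x2748774c,0x34b0bcb5,0x391c0cb3,0x4ed8aa4a,0x5b9cca4f,0x682e6ff3,
--      0x748f82ee,0x78a5636f,0x84c87814,0x8cc70208,0x90befffa,0xa4506ceb,0xbef9a3f7,0xc67178f2]
--
-- IV = [0x6a09e667,0xbb67ae85,0x3c6ef372,0xa54ff53a,0x510e527f,0x9b05688c,0x1f83d9ab,0x5be0cd19]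
--
-- def schedule(W16):
--     W = list(W16) + [0]*48
--     for i in range(16, 64):
--         W[i] = (sig1(W[i-2]) + W[i-7] + sig0(W[i-15]) + W[i-16]) & MASK
--     return W
--
-- def sha_r(W, R):
--     a,b,c,d,e,f,g,h = IV
--     states = [[a,b,c,d,e,f,g,h]]
--     for r in range(R):
--         T1 = (h + Sig1(e) + Ch(e,f,g) + K[r] + W[r]) & MASK
--         T2 = (Sig0(a) + Maj(a,b,c)) & MASK
--         h=g; g=f; f=e; e=(d+T1)&MASK
--         d=c; c=b; b=a; a=(T1+T2)&MASK
--         states.append([a,b,c,d,e,f,g,h])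
--     return states
--
-- def compute_f17_f18(W0, W1):
--     """
--     Быстрое вычисление f17=Da13+ΔW16 и f18=Da14+ΔW17.
--     Использует T_DE17_DECOMPOSITION и T_DE18_DECOMPOSITION.
--     """
--     Wn = [W0, W1] + [0]*14
--     DWs = [0]*16; DWs[0] = 1
--
--     # ΔW2 → De3=0
--     Wf_tmp = [(Wn[i]+DWs[i])&MASK for i in range(16)]
--     Wn_s = schedule(Wn); Wf_s = schedule(Wf_tmp)
--     sn = sha_r(Wn_s, 3); sf = sha_r(Wf_s, 3)
--     DWs[2] = (-(sf[3][4] - sn[3][4])) & MASK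
--
--     # Каскад ΔW3..ΔW15
--     for step in range(13):
--         wi = step+3; dt = step+4
--         Wfc = [(Wn[i]+DWs[i])&MASK for i in range(16)]
--         Wn_s = schedule(Wn); Wfc_s = schedule(Wfc)
--         sn = sha_r(Wn_s, dt); sf = sha_r(Wfc_s, dt)
--         DWs[wi] = (-(sf[dt][4] - sn[dt][4])) & MASK
--
--     # Финал: Da13, Da14, ΔW16, ΔW17
--     Wf = [(Wn[i]+DWs[i])&MASK for i in range(16)]
--     Wn_s = schedule(Wn); Wf_s = schedule(Wf)
--     sn = sha_r(Wn_s, 15); sf = sha_r(Wf_s, 15)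
--     da13 = (sf[13][0] - sn[13][0]) & MASK
--     da14 = (sf[14][0] - sn[14][0]) & MASK
--     DW16 = (Wf_s[16] - Wn_s[16]) & MASK
--     DW17 = (Wf_s[17] - Wn_s[17]) & MASK
--     f17 = (da13 + DW16) & MASK
--     f18 = (da14 + DW17) & MASK
--     return f17, f18
-- ===== SOURCE B (Python) =====
-- MASK = 0xFFFFFFFF
--
-- def rotr(x, n): return ((x >> n) | (x << (32-n))) & MASK
--
-- def sig0(x):  return rotr(x,7)  ^ rotr(x,18) ^ (x>>3)
--
-- def sig1(x):  return rotr(x,17) ^ rotr(x,19) ^ (x>>10)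
--
-- def Sig0(x):  return rotr(x,2)  ^ rotr(x,13) ^ rotr(x,22)
--
-- def Sig1(x):  return rotr(x,6)  ^ rotr(x,11) ^ rotr(x,25)
--
-- def Ch(e,f,g): return ((e&f) ^ (~e&g)) & MASK
--
-- def Maj(a,b,c): return (a&b) ^ (a&c) ^ (b&c)
--
-- K = [0x428a2f98,0x71374491,0xb5c0fbcf,0xe9b5dba5,0x3956c25b,0x59f111f1,0x923f82a4,0xab1c5ed5,
--      0xd807aa98,0x12835b01,0x243185be,0x550c7dc3,0x72be5d74,0x80deb1fe,0x9bdc06a7,0xc19bf174,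
--      0xe49b69c1,0xefbe4786,0x0fc19dc6,0x240ca1cc,0x2de92c6f,0x4a7484aa,0x5cb0a9dc,0x76f988da,
--      0x983e5152,0xa831c66d,0xb00327c8,0xbf597fc7,0xc6e00bf3,0xd5a79147,0x06ca6351,0x14292967,
--      0x27b70a85,0x2e1b2138,0x4d2c6dfc,0x53380d13,0x650a7354,0x766a0abb,0x81c2c92e,0x92722c85,
--      0xa2bfe8a1,0xa81a664b,0xc24b8b70,0xc76c51a3,0xd192e819,0xd6990624,0xf40e3585,0x106aa070,
--      0x19a4c116,0x1e376c08,0x2748774c,0x34b0bcb5,0x391c0cb3,0x4ed8aa4a,0x5b9cca4f,0x682e6ff3,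
--      0x748f82ee,0x78a5636f,0x84c87814,0x8cc70208,0x90befffa,0xa4506ceb,0xbef9a3f7,0xc67178f2]
--
-- IV = [0x6a09e667,0xbb67ae85,0x3c6ef372,0xa54ff53a,0x510e527f,0x9b05688c,0x1f83d9ab,0x5be0cd19]
--
-- def compute_f17_f18(W0, W1):
--     # Single simultaneous pass over the 16 rounds, running the nominal and the
--     # perturbed compression side by side.  Since the e-register after round r is
--     # an additive (mod 2^32) function of the message word W[r], each correction
--     # DWs[r] (r >= 2) is SOLVED algebraically in-flight so that the perturbed e
--     # equals the nominal e, instead of rerunning the whole compression and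
--     # measuring the residual difference.  No message-schedule expansion is run at
--     # all: the two expanded words W[16], W[17] are given directly by one
--     # application of the recurrence on the 16-word blocks.
--     Wn = [W0, W1] + [0]*14
--     DWs = [0]*16; DWs[0] = 1
--     an,bn,cn,dn,en,fn,gn,hn = IV
--     af,bf,cf,df,ef,ff,gf,hf = IV
--     da13 = 0; da14 = 0
--     for r in range(16):
--         # nominal round
--         T1n = (hn + Sig1(en) + Ch(en,fn,gn) + K[r] + Wn[r]) & MASK
--         T2n = (Sig0(an) + Maj(an,bn,cn)) & MASK
--         en_next = (dn + T1n) & MASK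
--         # perturbed round; for r >= 2 pick DWs[r] so its e matches the nominal e
--         T1f = (hf + Sig1(ef) + Ch(ef,ff,gf) + K[r] + ((Wn[r] + DWs[r]) & MASK)) & MASK
--         if r >= 2:
--             DWs[r] = (en_next - ((df + T1f) & MASK)) & MASK
--             T1f = (hf + Sig1(ef) + Ch(ef,ff,gf) + K[r] + ((Wn[r] + DWs[r]) & MASK)) & MASK
--         T2f = (Sig0(af) + Maj(af,bf,cf)) & MASK
--         hn=gn; gn=fn; fn=en; en=en_next
--         dn=cn; cn=bn; bn=an; an=(T1n+T2n)&MASK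
--         hf=gf; gf=ff; ff=ef; ef=(df+T1f)&MASK
--         df=cf; cf=bf; bf=af; af=(T1f+T2f)&MASK
--         if r == 12: da13 = (af - an) & MASK
--         if r == 13: da14 = (af - an) & MASK
--     # W[16] and W[17] of the schedule read only words 0,1,2,9,10,14,15
--     Wf = [(Wn[i]+DWs[i])&MASK for i in range(16)]
--     DW16 = (((sig1(Wf[14]) + Wf[9] + sig0(Wf[1]) + Wf[0]) & MASK)
--             - ((sig1(Wn[14]) + Wn[9] + sig0(Wn[1]) + Wn[0]) & MASK)) & MASK
--     DW17 = (((sig1(Wf[15]) + Wf[10] + sig0(Wf[2]) + Wf[1]) & MASK)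
--             - ((sig1(Wn[15]) + Wn[10] + sig0(Wn[2]) + Wn[1]) & MASK)) & MASK
--     f17 = (da13 + DW16) & MASK
--     f18 = (da14 + DW17) & MASK
--     return f17, f18
-- ===== Notes on version B (the rewrite author's own statement) =====
-- stated objective: faster
-- what changed: B replaces A's measure-and-correct cascade (one full compression rerun plus two 64-word schedule expansions per correction, ~15 restarts) by a single simultaneous two-trace pass over the 16 rounds that solves each correction DWs[r] algebraically in-flight from the additive dependence of the e-register on W[r], and computes the two expanded words W[16]/W[17] directly from the schedule recurrence instead of expanding any schedule.
import Mathlib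
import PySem

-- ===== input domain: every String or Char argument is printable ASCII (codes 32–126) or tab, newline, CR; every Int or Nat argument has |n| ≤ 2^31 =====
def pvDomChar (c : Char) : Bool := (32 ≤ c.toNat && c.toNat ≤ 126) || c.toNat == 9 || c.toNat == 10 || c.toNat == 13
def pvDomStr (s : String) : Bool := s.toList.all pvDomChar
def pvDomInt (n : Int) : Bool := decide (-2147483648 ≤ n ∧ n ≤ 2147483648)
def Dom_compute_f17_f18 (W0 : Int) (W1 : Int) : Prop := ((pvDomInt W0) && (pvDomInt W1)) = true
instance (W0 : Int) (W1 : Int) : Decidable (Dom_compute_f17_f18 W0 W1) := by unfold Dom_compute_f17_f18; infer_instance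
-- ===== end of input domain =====

-- B replaces A's measure-and-correct cascade (a full compression rerun plus two schedule
-- expansions per correction) by one simultaneous two-trace pass over the 16 rounds that
-- solves each correction algebraically in-flight and computes W[16]/W[17] directly from
-- the schedule recurrence.

-- ===== PORT A =====
-- module-level helpers shared verbatim by both Python files (A and B define them identically)
def pvMASK : Int := 0xFFFFFFFF

def pvRotr (x : Int) (n : Nat) : Int :=
  -- n is a Python int; every call site passes a literal 0 ≤ n ≤ 32, so Nat is exact here
  PySem.Int.band (PySem.Int.bor (x >>> n) (x <<< (32 - n))) pvMASK

def pvSig0 (x : Int) : Int := PySem.Int.bxor (PySem.Int.bxor (pvRotr x 7) (pvRotr x 18)) (x >>> 3)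
def pvSig1 (x : Int) : Int := PySem.Int.bxor (PySem.Int.bxor (pvRotr x 17) (pvRotr x 19)) (x >>> 10)
def pvBSig0 (x : Int) : Int := PySem.Int.bxor (PySem.Int.bxor (pvRotr x 2) (pvRotr x 13)) (pvRotr x 22)
def pvBSig1 (x : Int) : Int := PySem.Int.bxor (PySem.Int.bxor (pvRotr x 6) (pvRotr x 11)) (pvRotr x 25)
def pvCh (e f g : Int) : Int := PySem.Int.band (PySem.Int.bxor (PySem.Int.band e f) (PySem.Int.band (Int.not e) g)) pvMASK
def pvMaj (a b c : Int) : Int := PySem.Int.bxor (PySem.Int.bxor (PySem.Int.band a b) (PySem.Int.band a c)) (PySem.Int.band b c)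

def pvK : List Int :=
  [0x428a2f98,0x71374491,0xb5c0fbcf,0xe9b5dba5,0x3956c25b,0x59f111f1,0x923f82a4,0xab1c5ed5,
   0xd807aa98,0x12835b01,0x243185be,0x550c7dc3,0x72be5d74,0x80deb1fe,0x9bdc06a7,0xc19bf174,
   0xe49b69c1,0xefbe4786,0x0fc19dc6,0x240ca1cc,0x2de92c6f,0x4a7484aa,0x5cb0a9dc,0x76f988da,
   0x983e5152,0xa831c66d,0xb00327c8,0xbf597fc7,0xc6e00bf3,0xd5a79147,0x06ca6351,0x14292967,
   0x27b70a85,0x2e1b2138,0x4d2c6dfc,0x53380d13,0x650a7354,0x766a0abb,0x81c2c92e,0x92722c85,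
   0xa2bfe8a1,0xa81a664b,0xc24b8b70,0xc76c51a3,0xd192e819,0xd6990624,0xf40e3585,0x106aa070,
   0x19a4c116,0x1e376c08,0x2748774c,0x34b0bcb5,0x391c0cb3,0x4ed8aa4a,0x5b9cca4f,0x682e6ff3,
   0x748f82ee,0x78a5636f,0x84c87814,0x8cc70208,0x90befffa,0xa4506ceb,0xbef9a3f7,0xc67178f2]

def pvIV : List Int := [0x6a09e667,0xbb67ae85,0x3c6ef372,0xa54ff53a,0x510e527f,0x9b05688c,0x1f83d9ab,0x5be0cd19]

-- body of schedule's for-loop (indices i ∈ [16,64) are nonnegative, so Nat is exact)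
def pvSchedStep (W : List Int) (i : Nat) : List Int :=
  W.set i (PySem.Int.band
    (pvSig1 (W.getD (i-2) 0) + W.getD (i-7) 0 + pvSig0 (W.getD (i-15) 0) + W.getD (i-16) 0) pvMASK)

def pvSchedule (W16 : List Int) : List Int :=
  (List.range' 16 48).foldl pvSchedStep (W16 ++ List.replicate 48 0)

-- registers (a,b,c,d,e,f,g,h); every index access in sha_r is in range, so .getD _ 0 is exact
abbrev pvRegs : Type := Int × Int × Int × Int × Int × Int × Int × Int

def pvIVRegs : pvRegs :=
  (pvIV.getD 0 0, pvIV.getD 1 0, pvIV.getD 2 0, pvIV.getD 3 0,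
   pvIV.getD 4 0, pvIV.getD 5 0, pvIV.getD 6 0, pvIV.getD 7 0)

def pvRegsToList (x : pvRegs) : List Int :=
  [x.1, x.2.1, x.2.2.1, x.2.2.2.1, x.2.2.2.2.1, x.2.2.2.2.2.1, x.2.2.2.2.2.2.1, x.2.2.2.2.2.2.2]

-- one round of the sha_r loop body on the registers
def pvRegStep (W : List Int) (x : pvRegs) (r : Nat) : pvRegs :=
  let a := x.1; let b := x.2.1; let c := x.2.2.1; let d := x.2.2.2.1
  let e := x.2.2.2.2.1; let f := x.2.2.2.2.2.1; let g := x.2.2.2.2.2.2.1; let h := x.2.2.2.2.2.2.2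
  let T1 := PySem.Int.band (h + pvBSig1 e + pvCh e f g + pvK.getD r 0 + W.getD r 0) pvMASK
  let T2 := PySem.Int.band (pvBSig0 a + pvMaj a b c) pvMASK
  (PySem.Int.band (T1 + T2) pvMASK, a, b, c, PySem.Int.band (d + T1) pvMASK, e, f, g)

def pvShaStep (W : List Int) (st : List (List Int) × pvRegs) (r : Nat) : List (List Int) × pvRegs :=
  let x := pvRegStep W st.2 r
  (st.1 ++ [pvRegsToList x], x)

def pvShaR (W : List Int) (R : Nat) : List (List Int) :=
  ((List.range R).foldl (pvShaStep W) ([pvRegsToList pvIVRegs], pvIVRegs)).1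

def compute_f17_f18 (W0 : Int) (W1 : Int) : Int × Int :=
  let Wn : List Int := [W0, W1] ++ List.replicate 14 0
  let DWs0 : List Int := (List.replicate 16 (0:Int)).set 0 1
  -- ΔW2 → De3=0
  let Wf_tmp := (List.range 16).map (fun i => PySem.Int.band (Wn.getD i 0 + DWs0.getD i 0) pvMASK)
  let Wn_s := pvSchedule Wn
  let Wf_s := pvSchedule Wf_tmp
  let sn := pvShaR Wn_s 3
  let sf := pvShaR Wf_s 3
  let DWs1 := DWs0.set 2 (PySem.Int.band (-((sf.getD 3 []).getD 4 0 - (sn.getD 3 []).getD 4 0)) pvMASK)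
  -- cascade ΔW3..ΔW15
  let DWs := (List.range 13).foldl (fun DWs step =>
      let wi := step + 3
      let dt := step + 4
      let Wfc := (List.range 16).map (fun i => PySem.Int.band (Wn.getD i 0 + DWs.getD i 0) pvMASK)
      let Wn_s' := pvSchedule Wn
      let Wfc_s := pvSchedule Wfc
      let sn' := pvShaR Wn_s' dt
      let sf' := pvShaR Wfc_s dt
      DWs.set wi (PySem.Int.band (-((sf'.getD dt []).getD 4 0 - (sn'.getD dt []).getD 4 0)) pvMASK)) DWs1
  -- final
  let Wf := (List.range 16).map (fun i => PySem.Int.band (Wn.getD i 0 + DWs.getD i 0) pvMASK)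
  let Wn_s2 := pvSchedule Wn
  let Wf_s2 := pvSchedule Wf
  let sn2 := pvShaR Wn_s2 15
  let sf2 := pvShaR Wf_s2 15
  let da13 := PySem.Int.band ((sf2.getD 13 []).getD 0 0 - (sn2.getD 13 []).getD 0 0) pvMASK
  let da14 := PySem.Int.band ((sf2.getD 14 []).getD 0 0 - (sn2.getD 14 []).getD 0 0) pvMASK
  let DW16 := PySem.Int.band (Wf_s2.getD 16 0 - Wn_s2.getD 16 0) pvMASK
  let DW17 := PySem.Int.band (Wf_s2.getD 17 0 - Wn_s2.getD 17 0) pvMASK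
  (PySem.Int.band (da13 + DW16) pvMASK, PySem.Int.band (da14 + DW17) pvMASK)

-- ===== PORT B =====
-- one iteration of Source B's single simultaneous loop: state is
-- (nominal regs, perturbed regs, DWs, da13, da14)
def pvStepB (Wn : List Int) (st : pvRegs × pvRegs × List Int × Int × Int) (r : Nat) :
    pvRegs × pvRegs × List Int × Int × Int :=
  let n := st.1; let p := st.2.1; let DWs := st.2.2.1; let da13 := st.2.2.2.1; let da14 := st.2.2.2.2
  let an := n.1; let bn := n.2.1; let cn := n.2.2.1; let dn := n.2.2.2.1
  let en := n.2.2.2.2.1; let fn := n.2.2.2.2.2.1; let gn := n.2.2.2.2.2.2.1; let hn := n.2.2.2.2.2.2.2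
  let af := p.1; let bf := p.2.1; let cf := p.2.2.1; let df := p.2.2.2.1
  let ef := p.2.2.2.2.1; let ff := p.2.2.2.2.2.1; let gf := p.2.2.2.2.2.2.1; let hf := p.2.2.2.2.2.2.2
  let T1n := PySem.Int.band (hn + pvBSig1 en + pvCh en fn gn + pvK.getD r 0 + Wn.getD r 0) pvMASK
  let T2n := PySem.Int.band (pvBSig0 an + pvMaj an bn cn) pvMASK
  let en_next := PySem.Int.band (dn + T1n) pvMASK
  let T1f0 := PySem.Int.band (hf + pvBSig1 ef + pvCh ef ff gf + pvK.getD r 0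
                + PySem.Int.band (Wn.getD r 0 + DWs.getD r 0) pvMASK) pvMASK
  let DWs' := if 2 ≤ r then
      DWs.set r (PySem.Int.band (en_next - PySem.Int.band (df + T1f0) pvMASK) pvMASK)
    else DWs
  let T1f := if 2 ≤ r then
      PySem.Int.band (hf + pvBSig1 ef + pvCh ef ff gf + pvK.getD r 0
        + PySem.Int.band (Wn.getD r 0 + DWs'.getD r 0) pvMASK) pvMASK
    else T1f0
  let T2f := PySem.Int.band (pvBSig0 af + pvMaj af bf cf) pvMASK
  let n' : pvRegs := (PySem.Int.band (T1n + T2n) pvMASK, an, bn, cn, en_next, en, fn, gn)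
  let p' : pvRegs := (PySem.Int.band (T1f + T2f) pvMASK, af, bf, cf, PySem.Int.band (df + T1f) pvMASK, ef, ff, gf)
  let da13' := if r = 12 then PySem.Int.band (p'.1 - n'.1) pvMASK else da13
  let da14' := if r = 13 then PySem.Int.band (p'.1 - n'.1) pvMASK else da14
  (n', p', DWs', da13', da14')

def compute_f17_f18_alt (W0 : Int) (W1 : Int) : Int × Int :=
  let Wn : List Int := [W0, W1] ++ List.replicate 14 0
  let DWs0 : List Int := (List.replicate 16 (0:Int)).set 0 1
  let st := (List.range 16).foldl (pvStepB Wn) (pvIVRegs, pvIVRegs, DWs0, 0, 0)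
  let DWs := st.2.2.1
  let da13 := st.2.2.2.1
  let da14 := st.2.2.2.2
  -- W[16] and W[17] of the schedule read only words 0,1,2,9,10,14,15
  let Wf := (List.range 16).map (fun i => PySem.Int.band (Wn.getD i 0 + DWs.getD i 0) pvMASK)
  let DW16 := PySem.Int.band
      (PySem.Int.band (pvSig1 (Wf.getD 14 0) + Wf.getD 9 0 + pvSig0 (Wf.getD 1 0) + Wf.getD 0 0) pvMASK
       - PySem.Int.band (pvSig1 (Wn.getD 14 0) + Wn.getD 9 0 + pvSig0 (Wn.getD 1 0) + Wn.getD 0 0) pvMASK) pvMASK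
  let DW17 := PySem.Int.band
      (PySem.Int.band (pvSig1 (Wf.getD 15 0) + Wf.getD 10 0 + pvSig0 (Wf.getD 2 0) + Wf.getD 1 0) pvMASK
       - PySem.Int.band (pvSig1 (Wn.getD 15 0) + Wn.getD 10 0 + pvSig0 (Wn.getD 2 0) + Wn.getD 1 0) pvMASK) pvMASK
  (PySem.Int.band (da13 + DW16) pvMASK, PySem.Int.band (da14 + DW17) pvMASK)

-- ===== PRECONDITION & SPEC =====
def Spec_compute_f17_f18 (W0 : Int) (W1 : Int) (out : Int × Int) : Prop := out = compute_f17_f18_alt W0 W1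
instance (W0 : Int) (W1 : Int) (out : Int × Int) : Decidable (Spec_compute_f17_f18 W0 W1 out) := by unfold Spec_compute_f17_f18; infer_instance

-- ===== CLAIM (what is proved, stated in full; the proofs are below) =====
def Claim_equal_compute_f17_f18 : Prop := ∀ (W0 : Int) (W1 : Int), Dom_compute_f17_f18 W0 W1 → Spec_compute_f17_f18 W0 W1 (compute_f17_f18 W0 W1)

-- ===== LEMMAS AND PROOFS =====

-- proof-side abbreviations
def pvD0 : List Int := (List.replicate 16 (0:Int)).set 0 1

def pvF (Wn D : List Int) : List Int :=
  (List.range 16).map (fun i => PySem.Int.band (Wn.getD i 0 + D.getD i 0) pvMASK)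

-- one iteration of the schedule-free cascade (A's loop body with both schedule
-- expansions stripped and the nominal table hoisted)
def pvG (Wn : List Int) (DWs : List Int) (dt : Nat) : List Int :=
  DWs.set (dt-1) (PySem.Int.band
    (-(((pvShaR (pvF Wn DWs) dt).getD dt []).getD 4 0 - ((pvShaR Wn 16).getD dt []).getD 4 0)) pvMASK)

def pvDr (Wn : List Int) (r : Nat) : List Int := (List.range' 3 (r - 2)).foldl (pvG Wn) pvD0

def pvRegsOf (W : List Int) (R : Nat) : pvRegs :=
  ((List.range R).foldl (pvShaStep W) ([pvRegsToList pvIVRegs], pvIVRegs)).2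

def pvDa (Wn : List Int) (r k : Nat) : Int :=
  PySem.Int.band ((pvRegsOf (pvF Wn (pvDr Wn r)) k).1 - (pvRegsOf Wn k).1) pvMASK

-- midpoint: A with the nominal table hoisted, the De3 step merged into the cascade,
-- and all schedule expansions except the final one removed
def pvMid (W0 W1 : Int) : Int × Int :=
  let Wn : List Int := [W0, W1] ++ List.replicate 14 0
  let DWs := pvDr Wn 16
  let Wf := pvF Wn DWs
  let sn := pvShaR Wn 16
  let sf := pvShaR Wf 15
  let da13 := PySem.Int.band ((sf.getD 13 []).getD 0 0 - (sn.getD 13 []).getD 0 0) pvMASK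
  let da14 := PySem.Int.band ((sf.getD 14 []).getD 0 0 - (sn.getD 14 []).getD 0 0) pvMASK
  let Wn_s := pvSchedule Wn
  let Wf_s := pvSchedule Wf
  let DW16 := PySem.Int.band (Wf_s.getD 16 0 - Wn_s.getD 16 0) pvMASK
  let DW17 := PySem.Int.band (Wf_s.getD 17 0 - Wn_s.getD 17 0) pvMASK
  (PySem.Int.band (da13 + DW16) pvMASK, PySem.Int.band (da14 + DW17) pvMASK)

-- each sha round appends exactly one state row
theorem pvShaFold_len (W : List Int) (l : List Nat) (init : List (List Int) × pvRegs) :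
    (l.foldl (pvShaStep W) init).1.length = init.1.length + l.length := by
  induction l generalizing init with
  | nil => simp
  | cons a t ih =>
    rw [List.foldl_cons, ih]
    simp [pvShaStep]
    omega

-- the state table is prefix-stable: row dt of a longer run equals row dt of the dt-round run
theorem pvShaR_prefix (W : List Int) : ∀ (R dt : Nat), dt ≤ R →
    (pvShaR W R).getD dt [] = (pvShaR W dt).getD dt [] := by
  intro R
  induction R with
  | zero =>
    intro dt h
    have hdt : dt = 0 := by omega
    subst hdt; rfl
  | succ R ih =>
    intro dt h
    by_cases hdt : dt = R + 1
    · subst hdt; rfl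
    · have h' : dt ≤ R := by omega
      have hs : (pvShaR W (R+1)).getD dt [] = (pvShaR W R).getD dt [] := by
        simp only [pvShaR]
        rw [List.range_succ, List.foldl_append, List.foldl_cons, List.foldl_nil]
        simp only [pvShaStep]
        rw [List.getD_append]
        rw [pvShaFold_len]
        simp
        omega
      rw [hs, ih dt h']

-- sha_r reads only the first R message words
theorem pvShaFold_congr (W W' : List Int) : ∀ (R : Nat), (∀ r < R, W.getD r 0 = W'.getD r 0) →
    ∀ init, (List.range R).foldl (pvShaStep W) init = (List.range R).foldl (pvShaStep W') init := by
  intro R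
  induction R with
  | zero => intro _ init; rfl
  | succ R ih =>
    intro h init
    rw [List.range_succ, List.foldl_append, List.foldl_append,
        ih (fun r hr => h r (by omega)) init]
    have hR := h R (by omega)
    rw [List.getD_eq_getElem?_getD, List.getD_eq_getElem?_getD] at hR
    simp [pvShaStep, pvRegStep, hR]

theorem pvShaR_congr (W W' : List Int) (R : Nat) (h : ∀ r < R, W.getD r 0 = W'.getD r 0) :
    pvShaR W R = pvShaR W' R := by
  simp only [pvShaR]
  rw [pvShaFold_congr W W' R h]

theorem pvRegsOf_congr (W W' : List Int) (R : Nat) (h : ∀ r < R, W.getD r 0 = W'.getD r 0) :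
    pvRegsOf W R = pvRegsOf W' R := by
  simp only [pvRegsOf]
  rw [pvShaFold_congr W W' R h]

-- schedule steps with indices ≥ b do not touch entries < b
theorem pvSchedFold_first (b : Nat) : ∀ (l : List Nat), (∀ i ∈ l, b ≤ i) →
    ∀ (base : List Int) (r : Nat), r < b →
    (l.foldl pvSchedStep base).getD r 0 = base.getD r 0 := by
  intro l
  induction l with
  | nil => intro _ base r _; rfl
  | cons a t ih =>
    intro hl base r hr
    rw [List.foldl_cons, ih (fun i hi => hl i (List.mem_cons_of_mem _ hi)) _ r hr]
    unfold pvSchedStep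
    rw [List.getD_eq_getElem?_getD,
        List.getElem?_set_ne (by have := hl a List.mem_cons_self; omega),
        ← List.getD_eq_getElem?_getD]

theorem pvSchedule_first (W : List Int) (hlen : W.length = 16) (r : Nat) (hr : r < 16) :
    (pvSchedule W).getD r 0 = W.getD r 0 := by
  unfold pvSchedule
  rw [pvSchedFold_first 16 _ (fun i hi => (List.mem_range'_1.mp hi).1) _ r hr]
  exact List.getD_append _ _ _ _ (by omega)

-- a run of at most 16 rounds does not see the schedule expansion
theorem pvShaR_schedule (W : List Int) (hlen : W.length = 16) (R : Nat) (hR : R ≤ 16) :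
    pvShaR (pvSchedule W) R = pvShaR W R := by
  apply pvShaR_congr
  intro r hr
  exact pvSchedule_first W hlen r (by omega)

-- ===== A = pvMid =====
theorem pv_A_mid (W0 W1 : Int) : compute_f17_f18 W0 W1 = pvMid W0 W1 := by
  simp only [compute_f17_f18, pvMid, pvDr, pvF]
  generalize hWn : ([W0, W1] ++ List.replicate 14 0 : List Int) = Wn
  have hlen : Wn.length = 16 := by rw [← hWn]; rfl
  rw [show List.range' 3 14 = 3 :: List.range' 4 13 from rfl]
  simp only [List.foldl_cons]
  rw [List.range'_eq_map_range, List.foldl_map]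
  -- the unrolled De3 step is the dt = 3 instance of the schedule-free cascade body
  have hW0len : (List.map (fun i => PySem.Int.band (Wn.getD i 0 + ((List.replicate 16 0).set 0 1).getD i 0) pvMASK) (List.range 16)).length = 16 := by simp
  have hhead : ((List.replicate 16 (0:Int)).set 0 1).set 2
      (PySem.Int.band
        (-(((pvShaR (pvSchedule (List.map (fun i => PySem.Int.band (Wn.getD i 0 + ((List.replicate 16 0).set 0 1).getD i 0) pvMASK) (List.range 16))) 3).getD 3 []).getD 4 0 -
           ((pvShaR (pvSchedule Wn) 3).getD 3 []).getD 4 0)) pvMASK) =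
      pvG Wn pvD0 3 := by
    simp only [pvG, pvF, pvD0]
    rw [pvShaR_schedule Wn hlen 3 (by norm_num)]
    rw [pvShaR_schedule _ hW0len 3 (by norm_num)]
    rw [pvShaR_prefix Wn 16 3 (by norm_num)]
  rw [hhead]
  -- each cascade iteration is the dt = step+4 instance of the schedule-free body
  have hbody : ∀ (acc : List Int), ∀ y ∈ List.range 13,
      (fun (DWs : List Int) (step : Nat) =>
        DWs.set (step + 3)
          (PySem.Int.band
            (-(((pvShaR (pvSchedule (List.map (fun i => PySem.Int.band (Wn.getD i 0 + DWs.getD i 0) pvMASK) (List.range 16))) (step + 4)).getD (step + 4) []).getD 4 0 -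
               ((pvShaR (pvSchedule Wn) (step + 4)).getD (step + 4) []).getD 4 0)) pvMASK)) acc y =
      (fun (x : List Int) (y : Nat) => pvG Wn x (4 + y)) acc y := by
    intro acc y hy
    have hy' : y < 13 := List.mem_range.mp hy
    simp only [pvG, pvF]
    rw [show 4 + y = y + 4 from by omega, show y + 4 - 1 = y + 3 from by omega]
    rw [pvShaR_schedule Wn hlen (y + 4) (by omega)]
    rw [pvShaR_schedule _ (by simp : (List.map (fun i => PySem.Int.band (Wn.getD i 0 + acc.getD i 0) pvMASK) (List.range 16)).length = 16) (y + 4) (by omega)]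
    rw [pvShaR_prefix Wn 16 (y + 4) (by omega)]
  rw [PySem.List.foldl_congr_mem _ _ _ _ hbody]
  -- final block: drop the schedule expansion from the 15-round runs and read rows 13/14 off the full table
  rw [pvShaR_schedule Wn hlen 15 (by norm_num)]
  have hsf : ∀ D : List Int,
      pvShaR (pvSchedule (List.map (fun i => PySem.Int.band (Wn.getD i 0 + D.getD i 0) pvMASK) (List.range 16))) 15 =
      pvShaR (List.map (fun i => PySem.Int.band (Wn.getD i 0 + D.getD i 0) pvMASK) (List.range 16)) 15 :=
    fun D => pvShaR_schedule _ (by simp) 15 (by norm_num)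
  rw [hsf]
  rw [pvShaR_prefix Wn 15 13 (by norm_num), pvShaR_prefix Wn 16 13 (by norm_num),
      pvShaR_prefix Wn 15 14 (by norm_num), pvShaR_prefix Wn 16 14 (by norm_num)]

-- small getD/set helpers
theorem pv_getD_set_self (l : List Int) (i : Nat) (v : Int) (h : i < l.length) :
    (l.set i v).getD i 0 = v := by
  simp [List.getD_eq_getElem?_getD, h]

theorem pv_getD_set_ne (l : List Int) (i j : Nat) (v : Int) (h : j ≠ i) :
    (l.set i v).getD j 0 = l.getD j 0 := by
  rw [List.getD_eq_getElem?_getD, List.getElem?_set_ne (by omega), ← List.getD_eq_getElem?_getD]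

theorem pvRegsOf_succ (W : List Int) (R : Nat) :
    pvRegsOf W (R+1) = pvRegStep W (pvRegsOf W R) R := by
  simp only [pvRegsOf]
  rw [List.range_succ, List.foldl_append, List.foldl_cons, List.foldl_nil]
  rfl

theorem pvShaR_last (W : List Int) (R : Nat) :
    (pvShaR W R).getD R [] = pvRegsToList (pvRegsOf W R) := by
  cases R with
  | zero => rfl
  | succ n =>
    rw [pvRegsOf_succ]
    simp only [pvShaR]
    rw [List.range_succ, List.foldl_append, List.foldl_cons, List.foldl_nil]
    simp only [pvShaStep]
    have hl : ((List.range n).foldl (pvShaStep W) ([pvRegsToList pvIVRegs], pvIVRegs)).1.length = n + 1 := by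
      rw [pvShaFold_len]; simp only [List.length_cons, List.length_nil, List.length_range]; omega
    rw [List.getD_eq_getElem?_getD, List.getElem?_append_right (by omega), hl]
    simp only [Nat.sub_self, List.getElem?_cons_zero, Option.getD_some]
    rfl

theorem pvShaR_row (W : List Int) (R dt : Nat) (h : dt ≤ R) :
    (pvShaR W R).getD dt [] = pvRegsToList (pvRegsOf W dt) := by
  rw [pvShaR_prefix W R dt h, pvShaR_last]

theorem pvF_getD (Wn D : List Int) (i : Nat) (hi : i < 16) :
    (pvF Wn D).getD i 0 = PySem.Int.band (Wn.getD i 0 + D.getD i 0) pvMASK := by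
  simp [pvF, List.getD_eq_getElem?_getD, hi]

theorem pvGfold_len (Wn : List Int) (l : List Nat) : ∀ D : List Int,
    (l.foldl (pvG Wn) D).length = D.length := by
  induction l with
  | nil => intro D; rfl
  | cons a t ih => intro D; rw [List.foldl_cons, ih]; simp [pvG]

theorem pvDr_len (Wn : List Int) (r : Nat) : (pvDr Wn r).length = 16 := by
  simp [pvDr, pvGfold_len, pvD0]

theorem pvDr_le2 (Wn : List Int) (r : Nat) (h : r ≤ 2) : pvDr Wn r = pvD0 := by
  have h0 : r - 2 = 0 := by omega
  simp [pvDr, h0]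

theorem pvDr_succ (Wn : List Int) (r : Nat) (h2 : 2 ≤ r) :
    pvDr Wn (r+1) = pvG Wn (pvDr Wn r) (r+1) := by
  simp only [pvDr]
  have h : r + 1 - 2 = (r - 2) + 1 := by omega
  rw [h, List.range'_concat]
  have h3 : 3 + 1 * (r - 2) = r + 1 := by omega
  rw [h3, List.foldl_append, List.foldl_cons, List.foldl_nil]

theorem pvDr_succ_getD (Wn : List Int) (r i : Nat) (h2 : 2 ≤ r) (hir : i ≠ r) :
    (pvDr Wn (r+1)).getD i 0 = (pvDr Wn r).getD i 0 := by
  rw [pvDr_succ Wn r h2]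
  simp only [pvG]
  rw [Nat.add_sub_cancel]
  exact pv_getD_set_ne _ _ _ _ hir

-- the algebraically solved correction is A's measured one, written on the registers
theorem pvG_regs (Wn D : List Int) (r : Nat) (h16 : r < 16) :
    pvG Wn D (r+1) = D.set r (PySem.Int.band
      ((pvRegStep Wn (pvRegsOf Wn r) r).2.2.2.2.1
        - (pvRegStep (pvF Wn D) (pvRegsOf (pvF Wn D) r) r).2.2.2.2.1) pvMASK) := by
  simp only [pvG]
  rw [Nat.add_sub_cancel]
  rw [pvShaR_last (pvF Wn D) (r+1), pvShaR_row Wn 16 (r+1) (by omega)]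
  rw [pvRegsOf_succ (pvF Wn D) r, pvRegsOf_succ Wn r]
  simp only [pvRegsToList]
  rw [show ∀ a b c d e f g h : Int, ([a,b,c,d,e,f,g,h] : List Int).getD 4 0 = e from
        fun _ _ _ _ _ _ _ _ => rfl,
      show ∀ a b c d e f g h : Int, ([a,b,c,d,e,f,g,h] : List Int).getD 4 0 = e from
        fun _ _ _ _ _ _ _ _ => rfl]
  rw [neg_sub]

theorem pvDa_stable (Wn : List Int) (r k : Nat) (h2 : 2 ≤ r) (hk : k ≤ r) (hk16 : k ≤ 16) :
    pvDa Wn (r+1) k = pvDa Wn r k := by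
  simp only [pvDa]
  have h : pvRegsOf (pvF Wn (pvDr Wn (r+1))) k = pvRegsOf (pvF Wn (pvDr Wn r)) k := by
    apply pvRegsOf_congr
    intro i hi
    rw [pvF_getD _ _ i (by omega), pvF_getD _ _ i (by omega),
        pvDr_succ_getD Wn r i h2 (by omega)]
  rw [h]

-- the incremental two-trace pass tracks the cascade exactly
theorem pvInv (Wn : List Int) (r : Nat) (hr : r ≤ 16) :
    (List.range r).foldl (pvStepB Wn) (pvIVRegs, pvIVRegs, pvD0, 0, 0) =
      (pvRegsOf Wn r, pvRegsOf (pvF Wn (pvDr Wn r)) r, pvDr Wn r,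
       if 13 ≤ r then pvDa Wn r 13 else 0, if 14 ≤ r then pvDa Wn r 14 else 0) := by
  induction r with
  | zero => rfl
  | succ r ih =>
    have hr' : r ≤ 16 := by omega
    have h16 : r < 16 := by omega
    rw [List.range_succ, List.foldl_append, List.foldl_cons, List.foldl_nil, ih hr']
    by_cases h2 : 2 ≤ r
    · -- cascade rounds
      have hDnext : pvDr Wn (r+1) = (pvDr Wn r).set r (PySem.Int.band
          ((pvRegStep Wn (pvRegsOf Wn r) r).2.2.2.2.1
            - (pvRegStep (pvF Wn (pvDr Wn r)) (pvRegsOf (pvF Wn (pvDr Wn r)) r) r).2.2.2.2.1) pvMASK) := by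
        rw [pvDr_succ Wn r h2, pvG_regs Wn (pvDr Wn r) r h16]
      have hcongr : pvRegsOf (pvF Wn (pvDr Wn (r+1))) r = pvRegsOf (pvF Wn (pvDr Wn r)) r := by
        apply pvRegsOf_congr
        intro i hi
        rw [pvF_getD _ _ i (by omega), pvF_getD _ _ i (by omega),
            pvDr_succ_getD Wn r i h2 (by omega)]
      have hsetlen : r < (pvDr Wn r).length := by rw [pvDr_len]; omega
      simp only [pvStepB, if_pos h2, Prod.mk.injEq]
      refine ⟨?_, ?_, ?_, ?_, ?_⟩
      · -- nominal registers
        rw [pvRegsOf_succ Wn r]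
        simp only [pvRegStep]
      · -- perturbed registers
        rw [pvRegsOf_succ (pvF Wn (pvDr Wn (r+1))) r, hcongr, hDnext]
        simp only [pvRegStep]
        rw [pvF_getD _ _ r h16, pvF_getD _ _ r h16,
            pv_getD_set_self _ _ _ hsetlen]
      · -- DWs
        rw [hDnext]
        simp only [pvRegStep]
        rw [pvF_getD _ _ r h16]
      · -- da13
        by_cases h12 : r = 12
        · subst h12
          rw [if_pos rfl, if_pos (by omega)]
          simp only [pvDa]
          rw [show (13:Nat) = 12+1 from rfl,
              pvRegsOf_succ (pvF Wn (pvDr Wn (12+1))) 12, hcongr, hDnext,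
              pvRegsOf_succ Wn 12]
          simp only [pvRegStep]
          rw [pvF_getD _ _ 12 (by omega), pvF_getD _ _ 12 (by omega),
              pv_getD_set_self _ _ _ hsetlen]
        · by_cases h13 : 13 ≤ r
          · rw [if_neg h12, if_pos h13, if_pos (by omega),
                pvDa_stable Wn r 13 h2 (by omega) (by omega)]
          · rw [if_neg h12, if_neg h13, if_neg (by omega : ¬ 13 ≤ r+1)]
      · -- da14
        by_cases h13' : r = 13
        · subst h13'
          rw [if_pos rfl, if_pos (by omega)]
          simp only [pvDa]
          rw [show (14:Nat) = 13+1 from rfl,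
              pvRegsOf_succ (pvF Wn (pvDr Wn (13+1))) 13, hcongr, hDnext,
              pvRegsOf_succ Wn 13]
          simp only [pvRegStep]
          rw [pvF_getD _ _ 13 (by omega), pvF_getD _ _ 13 (by omega),
              pv_getD_set_self _ _ _ hsetlen]
        · by_cases h14 : 14 ≤ r
          · rw [if_neg h13', if_pos h14, if_pos (by omega),
                pvDa_stable Wn r 14 h2 (by omega) (by omega)]
          · rw [if_neg h13', if_neg h14, if_neg (by omega : ¬ 14 ≤ r+1)]
    · -- the two plain rounds r = 0, 1
      have hD1 : pvDr Wn (r+1) = pvD0 := pvDr_le2 Wn (r+1) (by omega)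
      have hD0 : pvDr Wn r = pvD0 := pvDr_le2 Wn r (by omega)
      rw [hD0, hD1]
      simp only [pvStepB, if_neg h2]
      rw [pvRegsOf_succ Wn r, pvRegsOf_succ (pvF Wn pvD0) r]
      have h12 : ¬ (r = 12) := by omega
      have h13 : ¬ (r = 13) := by omega
      have ha : ¬ (13 ≤ r) := by omega
      have hb : ¬ (14 ≤ r) := by omega
      have ha' : ¬ (13 ≤ r + 1) := by omega
      have hb' : ¬ (14 ≤ r + 1) := by omega
      simp only [if_neg h12, if_neg h13, if_neg ha, if_neg hb, if_neg ha', if_neg hb']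
      simp only [pvRegStep]
      rw [pvF_getD Wn pvD0 r h16]

-- rows 16 and 17 of the schedule from the recurrence directly
theorem pvSched_16 (W : List Int) (hlen : W.length = 16) :
    (pvSchedule W).getD 16 0 = PySem.Int.band
      (pvSig1 (W.getD 14 0) + W.getD 9 0 + pvSig0 (W.getD 1 0) + W.getD 0 0) pvMASK := by
  unfold pvSchedule
  rw [show List.range' 16 48 = 16 :: 17 :: List.range' 18 46 from rfl]
  rw [List.foldl_cons, List.foldl_cons]
  rw [pvSchedFold_first 18 _ (fun i hi => (List.mem_range'_1.mp hi).1) _ 16 (by omega)]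
  simp only [pvSchedStep]
  rw [pv_getD_set_ne _ _ _ _ (by omega)]
  rw [pv_getD_set_self _ _ _ (by simp [hlen])]
  rw [List.getD_append _ _ _ _ (by omega), List.getD_append _ _ _ _ (by omega),
      List.getD_append _ _ _ _ (by omega), List.getD_append _ _ _ _ (by omega)]

theorem pvSched_17 (W : List Int) (hlen : W.length = 16) :
    (pvSchedule W).getD 17 0 = PySem.Int.band
      (pvSig1 (W.getD 15 0) + W.getD 10 0 + pvSig0 (W.getD 2 0) + W.getD 1 0) pvMASK := by
  unfold pvSchedule
  rw [show List.range' 16 48 = 16 :: 17 :: List.range' 18 46 from rfl]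
  rw [List.foldl_cons, List.foldl_cons]
  rw [pvSchedFold_first 18 _ (fun i hi => (List.mem_range'_1.mp hi).1) _ 17 (by omega)]
  simp only [pvSchedStep]
  rw [pv_getD_set_self _ _ _ (by simp [hlen])]
  rw [pv_getD_set_ne _ _ _ _ (by omega), pv_getD_set_ne _ _ _ _ (by omega),
      pv_getD_set_ne _ _ _ _ (by omega), pv_getD_set_ne _ _ _ _ (by omega)]
  rw [List.getD_append _ _ _ _ (by omega), List.getD_append _ _ _ _ (by omega),
      List.getD_append _ _ _ _ (by omega), List.getD_append _ _ _ _ (by omega)]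

-- ===== pvMid = B =====
theorem pv_mid_alt (W0 W1 : Int) : pvMid W0 W1 = compute_f17_f18_alt W0 W1 := by
  simp only [pvMid, compute_f17_f18_alt]
  generalize hWn : ([W0, W1] ++ List.replicate 14 0 : List Int) = Wn
  have hlen : Wn.length = 16 := by rw [← hWn]; rfl
  rw [show ((List.replicate 16 (0:Int)).set 0 1) = pvD0 from rfl]
  rw [pvInv Wn 16 le_rfl]
  simp only []
  rw [show (List.range 16).map (fun i => PySem.Int.band (Wn.getD i 0 + (pvDr Wn 16).getD i 0) pvMASK) = pvF Wn (pvDr Wn 16) from rfl]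
  rw [pvShaR_row (pvF Wn (pvDr Wn 16)) 15 13 (by norm_num),
      pvShaR_row (pvF Wn (pvDr Wn 16)) 15 14 (by norm_num),
      pvShaR_row Wn 16 13 (by norm_num), pvShaR_row Wn 16 14 (by norm_num)]
  rw [pvSched_16 Wn hlen, pvSched_17 Wn hlen]
  have hlenF : (pvF Wn (pvDr Wn 16)).length = 16 := by simp [pvF]
  rw [pvSched_16 _ hlenF, pvSched_17 _ hlenF]
  rfl

-- ===== VERDICT (by name: the statement is the Claim_ definition above) =====
theorem compute_f17_f18_spec : Claim_equal_compute_f17_f18 := by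
  intro W0 W1 _
  unfold Spec_compute_f17_f18
  rw [pv_A_mid, pv_mid_alt]
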